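-- pv_equiv track=rewrite | github.com/valvalvak/SoftUni_courses | 03. Advanced/12.Regular Exam/02.1.py | get_player_position
-- ===== SOURCE A (Python) =====
-- PLAYER = "A"
--
-- TARGET = "x"
--
-- def get_player_position(field):
--     player_indices = None
--     target_count = 0
--     for row_idx in range(len(field)):
--         for col_idx in range(len(field[row_idx])):
--             if field[row_idx][col_idx] == PLAYER:
--                 player_indices = (row_idx, col_idx)
--             if field[row_idx][col_idx] == TARGET:
--                 target_count += 1
--
--     return player_indices, target_count
-- ===== SOURCE B (Python) =====
-- PLAYER = "A"
--
-- TARGET = "x"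
--
-- def get_player_position(field):
--     # Pass 1: count targets.
--     target_count = 0
--     for row in field:
--         for cell in row:
--             if cell == TARGET:
--                 target_count += 1
--     # Pass 2: search the grid BACKWARDS with early exit; the first player
--     # found in reverse order is the last one in A's forward scan order.
--     for i in range(len(field) - 1, -1, -1):
--         row = field[i]
--         for j in range(len(row) - 1, -1, -1):
--             if row[j] == PLAYER:
--                 return (i, j), target_count
--     return None, target_count
-- ===== Notes on version B (the rewrite author's own statement) =====
-- stated objective: alternative
-- what changed: Replaces A's single forward nested scan carrying two pieces of mutable state by two staged passes: a counting pass for targets, then a reverse-order search with early exit that returns at the first player found scanning backwards (equal to A's last forward occurrence).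
import Mathlib
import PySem

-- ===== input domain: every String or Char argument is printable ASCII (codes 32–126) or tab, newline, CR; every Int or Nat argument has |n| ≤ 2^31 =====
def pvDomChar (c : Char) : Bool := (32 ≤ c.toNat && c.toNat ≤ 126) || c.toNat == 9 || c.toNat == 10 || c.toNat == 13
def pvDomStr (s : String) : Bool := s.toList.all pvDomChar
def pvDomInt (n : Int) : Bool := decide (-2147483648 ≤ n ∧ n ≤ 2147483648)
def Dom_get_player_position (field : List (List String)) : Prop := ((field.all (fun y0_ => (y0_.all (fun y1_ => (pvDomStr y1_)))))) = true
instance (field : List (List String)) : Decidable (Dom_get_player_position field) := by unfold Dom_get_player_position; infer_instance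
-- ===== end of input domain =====

-- B replaces A's single forward scan carrying two pieces of state by two staged passes:
-- a counting pass for targets, then a reverse-order search with early exit for the player
-- (the first player found scanning backwards is A's last forward occurrence); objective: alternative.

-- ===== PORT A =====
def get_player_position (field : List (List String)) : (Option (Int × Int)) × Int :=
  (PySem.List.pyRange 0 (PySem.List.len field) 1).foldl (fun st row_idx =>
    (PySem.List.pyRange 0 (PySem.List.len (PySem.List.pyGetD field row_idx [])) 1).foldl (fun st2 col_idx =>
      let cell := PySem.List.pyGetD (PySem.List.pyGetD field row_idx []) col_idx ""
      let st3 := if cell == "A" then (some (row_idx, col_idx), st2.2) else st2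
      if cell == "x" then (st3.1, st3.2 + 1) else st3) st) (none, 0)

-- ===== PORT B =====
-- Source B's inner backwards loop 'for j in range(len(row)-1, -1, -1): if row[j] == PLAYER: return …':
-- recursion over the countdown index list, returning at the first hit (Python's early return).
def pvFindCols (row : List String) (i : Int) : List Int → Option (Int × Int)
  | [] => none
  | j :: js => if PySem.List.pyGetD row j "" == "A" then some (i, j) else pvFindCols row i js

-- Source B's outer backwards loop over row indices, propagating the inner early return.
def pvFindRows (field : List (List String)) : List Int → Option (Int × Int)
  | [] => none
  | i :: is =>
      let row := PySem.List.pyGetD field i []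
      match pvFindCols row i (PySem.List.pyRange (PySem.List.len row - 1) (-1) (-1)) with
      | some p => some p
      | none => pvFindRows field is

def get_player_position_alt (field : List (List String)) : (Option (Int × Int)) × Int :=
  let target_count : Int :=
    field.foldl (fun c row => row.foldl (fun c2 cell => if cell == "x" then c2 + 1 else c2) c) 0
  (pvFindRows field (PySem.List.pyRange (PySem.List.len field - 1) (-1) (-1)), target_count)

-- ===== PRECONDITION & SPEC =====
def Spec_get_player_position (field : List (List String)) (out : (Option (Int × Int)) × Int) : Prop := out = get_player_position_alt field
instance (field : List (List String)) (out : (Option (Int × Int)) × Int) : Decidable (Spec_get_player_position field out) := by unfold Spec_get_player_position; infer_instance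

-- ===== CLAIM (what is proved, stated in full; the proofs are below) =====
def Claim_equal_get_player_position : Prop := ∀ (field : List (List String)), Dom_get_player_position field → Spec_get_player_position field (get_player_position field)

-- ===== LEMMAS AND PROOFS =====

-- player positions contributed by one row (row index i, columns enumerated from j)
def pvPosRow (i : Int) (j : Int) (row : List String) : List (Int × Int) :=
  ((PySem.List.enumerate row j).filter (fun q => q.2 == "A")).map (fun q => (i, q.1))

-- the inner loop body of port A, on an (index, cell) pair
def pvStep (i : Int) (st : Option (Int × Int) × Int) (q : Int × String) : Option (Int × Int) × Int :=
  let st3 := if q.2 == "A" then (some (i, q.1), st.2) else st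
  if q.2 == "x" then (st3.1, st3.2 + 1) else st3

lemma pvPosRow_cons (i j : Int) (c : String) (row : List String) :
    pvPosRow i j (c :: row) =
      (if c == "A" then [(i, j)] else []) ++ pvPosRow i (j + 1) row := by
  by_cases h : c == "A" <;>
    simp [pvPosRow, PySem.List.enumerate_cons, h]

lemma pvInner (i : Int) (row : List String) (j : Int) (p : Option (Int × Int)) (c : Int) :
    (PySem.List.enumerate row j).foldl (pvStep i) (p, c) =
      (((pvPosRow i j row).getLast?).or p, c + (row.count "x" : Int)) := by
  induction row generalizing j p c with
  | nil => simp [pvPosRow, PySem.List.enumerate_nil]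
  | cons cell row ih =>
    rw [PySem.List.enumerate_cons, List.foldl_cons, pvPosRow_cons]
    by_cases hA : cell == "A"
    · have hx : (cell == "x") = false := by simp_all
      simp only [pvStep, hA, hx, if_true, Bool.false_eq_true, if_false]
      rw [ih]
      have hc : cell ≠ "x" := by simp_all
      cases hL : (pvPosRow i (j + 1) row).getLast? <;>
        simp [List.getLast?_cons, hL, Option.or, hc]
    · by_cases hx : cell == "x"
      · simp only [pvStep, hA, Bool.false_eq_true, if_false, hx, if_true]
        rw [ih]
        have hc : cell = "x" := by simp_all
        simp only [List.nil_append, List.count_cons, hc]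
        refine Prod.ext rfl ?_
        simp
        ring
      · simp only [pvStep, hA, hx, Bool.false_eq_true, if_false]
        rw [ih]
        have hc : cell ≠ "x" := by simp_all
        simp [hc]

lemma pvOuter (field : List (List String)) (i : Int) (p : Option (Int × Int)) (c : Int) :
    (PySem.List.enumerate field i).foldl
        (fun st pr => (PySem.List.enumerate pr.2 0).foldl (pvStep pr.1) st) (p, c) =
      ((((PySem.List.enumerate field i).flatMap (fun pr => pvPosRow pr.1 0 pr.2)).getLast?).or p,
        c + (field.map (fun row => ((row.count "x" : Nat) : Int))).sum) := by
  induction field generalizing i p c with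
  | nil => simp [PySem.List.enumerate_nil]
  | cons row field ih =>
    rw [PySem.List.enumerate_cons, List.foldl_cons, pvInner, ih]
    simp [Option.or_assoc]
    ring_nf

-- an index loop 'for j in range(len(xs)): … j … xs[j] …' is a fold over enumerate(xs)
lemma pvFoldIdx {α β : Type} (xs : List α) (d : α) (G : β → Int × α → β) (init : β) :
    (PySem.List.pyRange 0 (PySem.List.len xs) 1).foldl
        (fun st j => G st (j, PySem.List.pyGetD xs j d)) init
      = (PySem.List.enumerate xs 0).foldl G init := by
  rw [PySem.List.enumerate_eq_map_pyRange xs d, List.foldl_map]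

lemma pvA_eq (field : List (List String)) :
    get_player_position field =
      (PySem.List.enumerate field 0).foldl
        (fun st pr => (PySem.List.enumerate pr.2 0).foldl (pvStep pr.1) st) (none, 0) := by
  unfold get_player_position
  rw [← pvFoldIdx field ([] : List String)
        (fun st pr => (PySem.List.enumerate pr.2 0).foldl (pvStep pr.1) st) (none, 0)]
  refine PySem.List.foldl_congr_mem _ _ _ _ ?_
  intro st j _
  rw [← pvFoldIdx (PySem.List.pyGetD field j []) "" (pvStep j) st]
  rfl

-- B's counting pass equals the sum of per-row counts
lemma pvCountRow (row : List String) (c : Int) :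
    row.foldl (fun c2 cell => if cell == "x" then c2 + 1 else c2) c
      = c + (row.count "x" : Int) := by
  induction row generalizing c with
  | nil => simp
  | cons cell row ih =>
    by_cases h : cell == "x" <;>
      · have := ih (if cell == "x" then c + 1 else c)
        simp_all
        try ring

lemma pvCount (field : List (List String)) (c : Int) :
    field.foldl (fun c row => row.foldl (fun c2 cell => if cell == "x" then c2 + 1 else c2) c) c
      = c + (field.map (fun row => ((row.count "x" : Nat) : Int))).sum := by
  induction field generalizing c with
  | nil => simp
  | cons row field ih =>
    rw [List.foldl_cons, pvCountRow, ih]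
    simp only [List.map_cons, List.sum_cons]
    ring

-- early-exit searches split over list append
lemma pvFindCols_append (row : List String) (i : Int) (a b : List Int) :
    pvFindCols row i (a ++ b) = (pvFindCols row i a).or (pvFindCols row i b) := by
  induction a with
  | nil => simp [pvFindCols]
  | cons j js ih =>
    by_cases h : PySem.List.pyGetD row j "" == "A" <;> simp [pvFindCols, h, ih]

lemma pvFindRows_append (field : List (List String)) (a b : List Int) :
    pvFindRows field (a ++ b) = (pvFindRows field a).or (pvFindRows field b) := by
  induction a with
  | nil => simp [pvFindRows]
  | cons i is ih =>
    simp only [List.cons_append, pvFindRows]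
    cases pvFindCols (PySem.List.pyGetD field i [])
        i (PySem.List.pyRange (PySem.List.len (PySem.List.pyGetD field i []) - 1) (-1) (-1)) <;>
      simp [ih]

-- reverse search over a reversed index list = last forward match
lemma pvFindCols_reverse (row : List String) (i : Int) (l : List Int) :
    pvFindCols row i l.reverse
      = ((l.filter (fun j => PySem.List.pyGetD row j "" == "A")).map (fun j => (i, j))).getLast? := by
  induction l with
  | nil => simp [pvFindCols]
  | cons j js ih =>
    rw [List.reverse_cons, pvFindCols_append, ih]
    by_cases h : PySem.List.pyGetD row j "" == "A"
    · simp only [List.filter_cons, h, if_true, List.map_cons]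
      cases hL : ((js.filter (fun j => PySem.List.pyGetD row j "" == "A")).map
          (fun j => (i, j))).getLast? <;>
        simp [pvFindCols, h, List.getLast?_cons, hL, Option.or]
    · simp [h, pvFindCols]

-- the backwards column loop of one row finds the last player of that row
lemma pvRowLast (row : List String) (i : Int) :
    pvFindCols row i (PySem.List.pyRange (PySem.List.len row - 1) (-1) (-1))
      = (pvPosRow i 0 row).getLast? := by
  rw [PySem.List.pyRange_neg_one_eq_reverse,
    show (-1 : Int) + 1 = 0 by ring,
    show PySem.List.len row - 1 + 1 = PySem.List.len row by ring,
    pvFindCols_reverse, pvPosRow, PySem.List.enumerate_eq_map_pyRange row "",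
    List.filter_map, List.map_map]
  rfl

lemma pvFindRows_reverse (field : List (List String)) (l : List Int) :
    pvFindRows field l.reverse
      = (l.flatMap (fun i => pvPosRow i 0 (PySem.List.pyGetD field i []))).getLast? := by
  induction l with
  | nil => simp [pvFindRows]
  | cons i is ih =>
    rw [List.reverse_cons, pvFindRows_append, ih, List.flatMap_cons, List.getLast?_append]
    have hrow : pvFindRows field [i]
        = (pvPosRow i 0 (PySem.List.pyGetD field i [])).getLast? := by
      simp only [pvFindRows, pvRowLast]
      cases (pvPosRow i 0 (PySem.List.pyGetD field i [])).getLast? <;> rfl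
    rw [hrow]

-- ===== VERDICT (by name: the statement is the Claim_ definition above) =====
theorem get_player_position_spec : Claim_equal_get_player_position := by
  intro field _
  show get_player_position field = get_player_position_alt field
  rw [pvA_eq, pvOuter field 0 none 0]
  unfold get_player_position_alt
  rw [pvCount,
    PySem.List.pyRange_neg_one_eq_reverse,
    show (-1 : Int) + 1 = 0 by ring,
    show PySem.List.len field - 1 + 1 = PySem.List.len field by ring,
    pvFindRows_reverse,
    PySem.List.enumerate_eq_map_pyRange field ([] : List String),
    List.flatMap_map]
  simp
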